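-- pv_equiv track=rewrite | github.com/UCLA-SEAL/SynthFuzz | figures-tables/ablation-params.py | broad_category
-- ===== SOURCE A (Python) =====
-- def broad_category(errs):
--     broad_categories = {
--         "valid": ["valid"],
--         "general mlir": ["undefined", "redefinition", "conflicting type"],
--         # these are errors we exclude either because they do not relate to input validty checks or otherwise
--         "exclude errors": ["unregistered", "no such option", "unknown option", "failed to legalize", "name op no results", "syntax"],
--         "op specific type errors": ["invalid type", "function signature", "shape inference", "assertion"],
--         "structural": ["invalid parent", "cardinality", "wrong structure", "invalid terminator", "does not dominate", "other structure"],
--     }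
--
--     broad_errs = {"op specific": []}
--     for bcat, includes in broad_categories.items():
--         broad_errs[bcat] = []
--
--     for error_type, errstrs in errs.items():
--         categorized = False
--         for bcat, includes in broad_categories.items():
--             if error_type in includes:
--                 broad_errs[bcat].extend(errstrs)
--                 categorized = True
--         if not categorized:
--             broad_errs["op specific"].extend(errstrs)
--     return broad_errs
-- ===== SOURCE B (Python) =====
-- def broad_category(errs):
--     broad_categories = {
--         "valid": ["valid"],
--         "general mlir": ["undefined", "redefinition", "conflicting type"],
--         "exclude errors": ["unregistered", "no such option", "unknown option", "failed to legalize", "name op no results", "syntax"],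
--         "op specific type errors": ["invalid type", "function signature", "shape inference", "assertion"],
--         "structural": ["invalid parent", "cardinality", "wrong structure", "invalid terminator", "does not dominate", "other structure"],
--     }
--     # index once: keyword -> broad category (keyword lists are disjoint)
--     kw_to_cat = {}
--     for bcat, includes in broad_categories.items():
--         for kw in includes:
--             kw_to_cat[kw] = bcat
--     broad_errs = {"op specific": []}
--     for bcat in broad_categories:
--         broad_errs[bcat] = []
--     for error_type, errstrs in errs.items():
--         broad_errs[kw_to_cat.get(error_type, "op specific")].extend(errstrs)
--     return broad_errs
-- ===== Notes on version B (the rewrite author's own statement) =====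
-- stated objective: idiomatic
-- what changed: B builds a reverse keyword-to-category dict once and makes a single pass over errs with one lookup per item, instead of A's inner scan over all five categories (with a 'categorized' flag) for every error type.
import Mathlib
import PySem

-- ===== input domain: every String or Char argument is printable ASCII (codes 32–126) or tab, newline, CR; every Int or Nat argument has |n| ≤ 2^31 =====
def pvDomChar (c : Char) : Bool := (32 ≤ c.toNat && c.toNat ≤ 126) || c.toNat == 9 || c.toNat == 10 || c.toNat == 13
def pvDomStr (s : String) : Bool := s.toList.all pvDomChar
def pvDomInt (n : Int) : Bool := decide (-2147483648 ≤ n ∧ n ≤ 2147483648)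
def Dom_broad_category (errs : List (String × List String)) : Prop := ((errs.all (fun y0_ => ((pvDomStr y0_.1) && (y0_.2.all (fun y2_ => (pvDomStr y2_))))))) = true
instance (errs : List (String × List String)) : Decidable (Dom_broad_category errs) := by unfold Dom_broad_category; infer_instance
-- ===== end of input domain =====

-- B replaces A's per-item inner scan over all categories by a keyword→category dict built once,
-- then a single lookup per item (objective: idiomatic; same observable result).

-- ===== PORT A =====
-- the literal broad_categories table of A (hoisted constant)
def pvTableA : List (String × List String) := [
  ("valid", ["valid"]),
  ("general mlir", ["undefined", "redefinition", "conflicting type"]),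
  ("exclude errors", ["unregistered", "no such option", "unknown option", "failed to legalize", "name op no results", "syntax"]),
  ("op specific type errors", ["invalid type", "function signature", "shape inference", "assertion"]),
  ("structural", ["invalid parent", "cardinality", "wrong structure", "invalid terminator", "does not dominate", "other structure"])]

-- one iteration of A's outer loop: scan every category, extend on membership, flag 'categorized'
def pvStepA (d : PySem.Dict String (List String)) (p : String × List String) :
    PySem.Dict String (List String) :=
  let st := pvTableA.foldl
    (fun (acc : PySem.Dict String (List String) × Bool) q =>
      if p.1 ∈ q.2 then (acc.1.modify q.1 [] (· ++ p.2), true) else acc)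
    (d, false)
  if st.2 then st.1 else st.1.modify "op specific" [] (· ++ p.2)

def broad_category (errs : List (String × List String)) : List (String × List String) :=
  (errs.foldl pvStepA
    (pvTableA.foldl (fun d q => d.insert q.1 [])
      ((PySem.Dict.empty : PySem.Dict String (List String)).insert "op specific" []))).items

-- ===== PORT B =====
-- the same literal table, as written in Source B
def pvTableB : List (String × List String) := [
  ("valid", ["valid"]),
  ("general mlir", ["undefined", "redefinition", "conflicting type"]),
  ("exclude errors", ["unregistered", "no such option", "unknown option", "failed to legalize", "name op no results", "syntax"]),
  ("op specific type errors", ["invalid type", "function signature", "shape inference", "assertion"]),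
  ("structural", ["invalid parent", "cardinality", "wrong structure", "invalid terminator", "does not dominate", "other structure"])]

-- kw_to_cat, built once by the double loop in Source B
def pvKwToCat : PySem.Dict String String :=
  pvTableB.foldl (fun d q => q.2.foldl (fun d k => d.insert k q.1) d)
    (PySem.Dict.empty : PySem.Dict String String)

-- broad_errs initialisation of Source B
def pvInitB : PySem.Dict String (List String) :=
  pvTableB.foldl (fun d q => d.insert q.1 [])
    ((PySem.Dict.empty : PySem.Dict String (List String)).insert "op specific" [])

-- one iteration of Source B's single pass: one dict lookup, one extend
def pvStepB (d : PySem.Dict String (List String)) (p : String × List String) :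
    PySem.Dict String (List String) :=
  d.modify (pvKwToCat.getD p.1 "op specific") [] (· ++ p.2)

def broad_category_alt (errs : List (String × List String)) : List (String × List String) :=
  (errs.foldl pvStepB pvInitB).items

-- ===== PRECONDITION & SPEC =====
def Spec_broad_category (errs : List (String × List String)) (out : List (String × List String)) : Prop := out = broad_category_alt errs
instance (errs : List (String × List String)) (out : List (String × List String)) : Decidable (Spec_broad_category errs out) := by unfold Spec_broad_category; infer_instance

-- ===== CLAIM (what is proved, stated in full; the proofs are below) =====
def Claim_equal_broad_category : Prop := ∀ (errs : List (String × List String)), Dom_broad_category errs → Spec_broad_category errs (broad_category errs)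

-- ===== LEMMAS AND PROOFS =====
-- the two loop bodies agree on every item: case on which keyword (if any) the error type is
theorem pvStep_eq (d : PySem.Dict String (List String)) (s : String) (v : List String) :
    pvStepA d (s, v) = pvStepB d (s, v) := by
  simp only [pvStepA, pvStepB, pvTableA, pvKwToCat, pvTableB, List.foldl_cons, List.foldl_nil,
    List.mem_cons, List.not_mem_nil, or_false, PySem.Dict.getD_insert, PySem.Dict.getD_empty]
  by_cases h0 : s = "valid"
  · subst h0; simp
  by_cases h1 : s = "undefined"
  · subst h1; simp
  by_cases h2 : s = "redefinition"
  · subst h2; simp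
  by_cases h3 : s = "conflicting type"
  · subst h3; simp
  by_cases h4 : s = "unregistered"
  · subst h4; simp
  by_cases h5 : s = "no such option"
  · subst h5; simp
  by_cases h6 : s = "unknown option"
  · subst h6; simp
  by_cases h7 : s = "failed to legalize"
  · subst h7; simp
  by_cases h8 : s = "name op no results"
  · subst h8; simp
  by_cases h9 : s = "syntax"
  · subst h9; simp
  by_cases h10 : s = "invalid type"
  · subst h10; simp
  by_cases h11 : s = "function signature"
  · subst h11; simp
  by_cases h12 : s = "shape inference"
  · subst h12; simp
  by_cases h13 : s = "assertion"
  · subst h13; simp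
  by_cases h14 : s = "invalid parent"
  · subst h14; simp
  by_cases h15 : s = "cardinality"
  · subst h15; simp
  by_cases h16 : s = "wrong structure"
  · subst h16; simp
  by_cases h17 : s = "invalid terminator"
  · subst h17; simp
  by_cases h18 : s = "does not dominate"
  · subst h18; simp
  by_cases h19 : s = "other structure"
  · subst h19; simp
  -- s is none of the keywords: every membership test and every lookup step fails
  simp [h0, h1, h2, h3, h4, h5, h6, h7, h8, h9, h10, h11, h12, h13, h14, h15, h16, h17, h18, h19]

-- ===== VERDICT (by name: the statement is the Claim_ definition above) =====
theorem broad_category_spec : Claim_equal_broad_category := by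
  intro errs _
  show broad_category errs = broad_category_alt errs
  have hstep : pvStepA = pvStepB := funext fun d => funext fun p => pvStep_eq d p.1 p.2
  have hinit : pvTableA.foldl (fun d q => d.insert q.1 [])
      ((PySem.Dict.empty : PySem.Dict String (List String)).insert "op specific" []) = pvInitB := by
    decide
  unfold broad_category broad_category_alt
  rw [hstep, hinit]
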